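-- pv_equiv track=rewrite | github.com/nishio/atcoder | abc184/c.py | solve
-- ===== SOURCE A (Python) =====
-- def solve(R1, C1, R2, C2, phase=0):
--     # debug(R1, C1, msg=":R1, C1")
--     if R1 == R2 and C1 == C2:
--         return 0
--     if R1 + C1 == R2 + C2:
--         return 1
--     if R1 - C1 == R2 - C2:
--         return 1
--     if abs(R1 - R2) + abs(C1 - C2) <= 3:
--         return 1
--
--     d1 = abs(R1 + C1 - R2 - C2)
--     d2 = abs(R1 - C1 - R2 + C2)
--     if d1 > d2:
--         d = R1 + C1 - R2 - C2
--         d //= 2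
--         R1 -= d
--         C1 -= d
--         return solve(R1, C1, R2, C2) + 1
--     else:
--         d = R1 - C1 - R2 + C2
--         d //= 2
--         R1 -= d
--         C1 += d
--         return solve(R1, C1, R2, C2) + 1
-- ===== SOURCE B (Python) =====
-- def solve(R1, C1, R2, C2, phase=0):
--     # flat closed-form classifier: no recursion, just arithmetic predicates
--     if R1 == R2 and C1 == C2:
--         return 0
--     if R1 + C1 == R2 + C2 or R1 - C1 == R2 - C2 or abs(R1 - R2) + abs(C1 - C2) <= 3:
--         return 1
--     if (R1 + C1 + R2 + C2) % 2 == 0 or abs((R1 + C1) - (R2 + C2)) <= 3 or abs((R1 - C1) - (R2 - C2)) <= 3: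
--         return 2
--     return 3
-- ===== Notes on version B (the rewrite author's own statement) =====
-- stated objective: simpler
-- what changed: Replaced A's recursive move-simulation (shift along a diagonal, recurse, +1) by a flat non-recursive cascade of arithmetic predicates classifying the answer as 0, 1, 2 or 3.
import Mathlib
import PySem

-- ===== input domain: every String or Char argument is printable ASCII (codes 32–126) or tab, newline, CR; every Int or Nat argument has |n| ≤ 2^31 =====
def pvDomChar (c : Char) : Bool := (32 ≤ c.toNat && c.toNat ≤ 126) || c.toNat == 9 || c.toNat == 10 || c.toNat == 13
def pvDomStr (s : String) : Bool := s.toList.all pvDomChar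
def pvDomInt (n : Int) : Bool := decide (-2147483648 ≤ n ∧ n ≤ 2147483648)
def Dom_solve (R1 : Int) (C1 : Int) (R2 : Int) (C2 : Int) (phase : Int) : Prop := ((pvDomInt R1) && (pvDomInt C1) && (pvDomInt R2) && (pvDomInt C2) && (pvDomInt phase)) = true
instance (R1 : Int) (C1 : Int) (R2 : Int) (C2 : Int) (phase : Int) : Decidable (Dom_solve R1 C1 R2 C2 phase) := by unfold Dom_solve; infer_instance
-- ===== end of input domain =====

-- ===== PORT A =====
-- B replaces A's bounded recursion by a flat closed-form classifier (objective: simpler).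
-- solveA carries a fuel counter only to make A's self-recursion structural; fuel 4 always
-- suffices (A's recursion depth is at most 3), so the fuel never changes the computed value.
def solveA : Nat → Int → Int → Int → Int → Int
  | 0, _, _, _, _ => 0
  | fuel+1, R1, C1, R2, C2 =>
    if R1 = R2 ∧ C1 = C2 then 0
    else if R1 + C1 = R2 + C2 then 1
    else if R1 - C1 = R2 - C2 then 1
    else if |R1 - R2| + |C1 - C2| ≤ 3 then 1
    else
      let d1 := |R1 + C1 - R2 - C2|
      let d2 := |R1 - C1 - R2 + C2|
      if d1 > d2 then
        let d := PySem.Int.floordiv (R1 + C1 - R2 - C2) 2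
        solveA fuel (R1 - d) (C1 - d) R2 C2 + 1
      else
        let d := PySem.Int.floordiv (R1 - C1 - R2 + C2) 2
        solveA fuel (R1 - d) (C1 + d) R2 C2 + 1

def solve (R1 : Int) (C1 : Int) (R2 : Int) (C2 : Int) (phase : Int) : Int :=
  solveA 4 R1 C1 R2 C2

-- ===== PORT B =====
def solve_alt (R1 : Int) (C1 : Int) (R2 : Int) (C2 : Int) (phase : Int) : Int :=
  if R1 = R2 ∧ C1 = C2 then 0
  else if R1 + C1 = R2 + C2 ∨ R1 - C1 = R2 - C2 ∨ |R1 - R2| + |C1 - C2| ≤ 3 then 1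
  else if PySem.Int.mod (R1 + C1 + R2 + C2) 2 = 0 ∨ |R1 + C1 - (R2 + C2)| ≤ 3 ∨ |R1 - C1 - (R2 - C2)| ≤ 3 then 2
  else 3

-- ===== PRECONDITION & SPEC =====
def Spec_solve (R1 : Int) (C1 : Int) (R2 : Int) (C2 : Int) (phase : Int) (out : Int) : Prop := out = solve_alt R1 C1 R2 C2 phase
instance (R1 : Int) (C1 : Int) (R2 : Int) (C2 : Int) (phase : Int) (out : Int) : Decidable (Spec_solve R1 C1 R2 C2 phase out) := by unfold Spec_solve; infer_instance

-- ===== CLAIM (what is proved, stated in full; the proofs are below) =====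
def Claim_equal_solve : Prop := ∀ (R1 : Int) (C1 : Int) (R2 : Int) (C2 : Int) (phase : Int), Dom_solve R1 C1 R2 C2 phase → Spec_solve R1 C1 R2 C2 phase (solve R1 C1 R2 C2 phase)

-- ===== LEMMAS AND PROOFS =====
theorem fd2 (a : Int) : PySem.Int.floordiv a 2 = a / 2 :=
  PySem.Int.floordiv_eq_ediv_of_pos (by norm_num)

theorem m2 (a : Int) : PySem.Int.mod a 2 = a % 2 :=
  PySem.Int.mod_eq_emod_of_pos (by norm_num)

-- one-level unfolding lemmas for solveA (the fuel stays a variable, so nothing recurses)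
theorem solveA_base0 (n : Nat) (R1 C1 R2 C2 : Int) (h : R1 = R2 ∧ C1 = C2) :
    solveA (n+1) R1 C1 R2 C2 = 0 := by
  simp only [solveA, if_pos h]

theorem solveA_base1 (n : Nat) (R1 C1 R2 C2 : Int) (h0 : ¬(R1 = R2 ∧ C1 = C2))
    (h1 : R1 + C1 = R2 + C2 ∨ R1 - C1 = R2 - C2 ∨ |R1 - R2| + |C1 - C2| ≤ 3) :
    solveA (n+1) R1 C1 R2 C2 = 1 := by
  simp only [solveA]
  split_ifs <;> first | rfl | (exfalso; tauto)

theorem solveA_step (n : Nat) (R1 C1 R2 C2 : Int) (h0 : ¬(R1 = R2 ∧ C1 = C2))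
    (h1 : ¬(R1 + C1 = R2 + C2 ∨ R1 - C1 = R2 - C2 ∨ |R1 - R2| + |C1 - C2| ≤ 3)) :
    solveA (n+1) R1 C1 R2 C2 =
      (if |R1 + C1 - R2 - C2| > |R1 - C1 - R2 + C2| then
        solveA n (R1 - (R1 + C1 - R2 - C2) / 2) (C1 - (R1 + C1 - R2 - C2) / 2) R2 C2
      else
        solveA n (R1 - (R1 - C1 - R2 + C2) / 2) (C1 + (R1 - C1 - R2 + C2) / 2) R2 C2) + 1 := by
  push Not at h1
  obtain ⟨ha, hb, hc⟩ := h1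
  simp only [solveA, fd2, if_neg h0, if_neg ha, if_neg hb, if_neg (not_le.mpr hc)]
  split_ifs <;> rfl

set_option maxHeartbeats 1000000 in
theorem solveA4_eq (R1 C1 R2 C2 phase : Int) : solveA 4 R1 C1 R2 C2 = solve_alt R1 C1 R2 C2 phase := by
  unfold solve_alt
  rw [m2]
  by_cases h0 : R1 = R2 ∧ C1 = C2
  · rw [solveA_base0 3 _ _ _ _ h0, if_pos h0]
  rw [if_neg h0]
  by_cases h1 : R1 + C1 = R2 + C2 ∨ R1 - C1 = R2 - C2 ∨ |R1 - R2| + |C1 - C2| ≤ 3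
  · rw [solveA_base1 3 _ _ _ _ h0 h1, if_pos h1]
  rw [if_neg h1, solveA_step 3 _ _ _ _ h0 h1]
  have h1' := h1
  push Not at h1'
  obtain ⟨hu, hv, hd⟩ := h1'
  simp only [Int.abs_eq_natAbs] at hd
  by_cases hb : |R1 + C1 - R2 - C2| > |R1 - C1 - R2 + C2|
  · rw [if_pos hb]
    simp only [Int.abs_eq_natAbs] at hb
    by_cases hpar : (R1 + C1 + R2 + C2) % 2 = 0
    · rw [solveA_base1 2 _ _ _ _ (by rintro ⟨e1, e2⟩; omega) (Or.inl (by omega)),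
        if_pos (Or.inl hpar)]
      norm_num
    · by_cases hv3 : |R1 - C1 - R2 + C2| ≤ 3
      · have hv3' := hv3
        simp only [Int.abs_eq_natAbs] at hv3'
        rw [solveA_base1 2 _ _ _ _ (by rintro ⟨e1, e2⟩; omega)
            (Or.inr (Or.inr (by simp only [Int.abs_eq_natAbs]; omega))),
          if_pos (Or.inr (Or.inr (by rw [show R1 - C1 - (R2 - C2) = R1 - C1 - R2 + C2 by ring]; exact hv3)))]
        norm_num
      · -- |u| > |v| ≥ 4, both odd: two more steps
        simp only [Int.abs_eq_natAbs] at hv3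
        rw [solveA_step 2 _ _ _ _ (by rintro ⟨e1, e2⟩; omega)
            (by simp only [Int.abs_eq_natAbs]; push Not; refine ⟨by omega, by omega, by omega⟩),
          if_neg (by simp only [Int.abs_eq_natAbs]; omega),
          solveA_base1 1 _ _ _ _ (by rintro ⟨e1, e2⟩; omega)
            (Or.inr (Or.inr (by simp only [Int.abs_eq_natAbs]; omega))),
          if_neg (by
            push Not
            refine ⟨hpar, ?_, ?_⟩ <;> simp only [Int.abs_eq_natAbs] <;> omega)]
        norm_num
  · rw [if_neg hb]
    simp only [Int.abs_eq_natAbs, not_lt] at hb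
    by_cases hpar : (R1 + C1 + R2 + C2) % 2 = 0
    · rw [solveA_base1 2 _ _ _ _ (by rintro ⟨e1, e2⟩; omega) (Or.inr (Or.inl (by omega))),
        if_pos (Or.inl hpar)]
      norm_num
    · by_cases hu3 : |R1 + C1 - R2 - C2| ≤ 3
      · have hu3' := hu3
        simp only [Int.abs_eq_natAbs] at hu3'
        rw [solveA_base1 2 _ _ _ _ (by rintro ⟨e1, e2⟩; omega)
            (Or.inr (Or.inr (by simp only [Int.abs_eq_natAbs]; omega))),
          if_pos (Or.inr (Or.inl (by rw [show R1 + C1 - (R2 + C2) = R1 + C1 - R2 - C2 by ring]; exact hu3)))]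
        norm_num
      · simp only [Int.abs_eq_natAbs] at hu3
        rw [solveA_step 2 _ _ _ _ (by rintro ⟨e1, e2⟩; omega)
            (by simp only [Int.abs_eq_natAbs]; push Not; refine ⟨by omega, by omega, by omega⟩),
          if_pos (by simp only [Int.abs_eq_natAbs]; omega),
          solveA_base1 1 _ _ _ _ (by rintro ⟨e1, e2⟩; omega)
            (Or.inr (Or.inr (by simp only [Int.abs_eq_natAbs]; omega))),
          if_neg (by
            push Not
            refine ⟨hpar, ?_, ?_⟩ <;> simp only [Int.abs_eq_natAbs] <;> omega)]
        norm_num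

-- ===== VERDICT (by name: the statement is the Claim_ definition above) =====
theorem solve_spec : Claim_equal_solve := by
  intro R1 C1 R2 C2 phase _
  exact solveA4_eq R1 C1 R2 C2 phase
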